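-- pv_equiv track=rewrite | github.com/SergioCantillo-Cotel/NILM_Control | app.py | seleccionar_unidades
-- ===== SOURCE A (Python) =====
-- def seleccionar_unidades(pred, intensidad_base):
--     tabla_intensidad = {
--         0:  [0, 0, 0, 0, 0],
--         15: [1, 0, 0, 0, 0],
--         25: [1, 0, 1, 0, 0],
--         50: [1, 0, 1, 1, 0],
--         75: [1, 0, 1, 1, 1],
--         100:[1, 1, 1, 1, 1],
--     }
--
--     diferencia = abs(pred - intensidad_base)
--     intensidades = sorted(tabla_intensidad.keys())
--
--     if diferencia < 10:
--         intensidad_cercana = max([i for i in intensidades if i <= intensidad_base], default=0)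
--     else:
--         intensidad_cercana = max([i for i in intensidades if i <= pred], default=0)
--
--     return tabla_intensidad[intensidad_cercana]
-- ===== SOURCE B (Python) =====
-- def seleccionar_unidades(pred, intensidad_base):
--     target = intensidad_base if abs(pred - intensidad_base) < 10 else pred
--     if target >= 100:
--         return [1, 1, 1, 1, 1]
--     if target >= 75:
--         return [1, 0, 1, 1, 1]
--     if target >= 50:
--         return [1, 0, 1, 1, 0]
--     if target >= 25:
--         return [1, 0, 1, 0, 0]
--     if target >= 15:
--         return [1, 0, 0, 0, 0]
--     return [0, 0, 0, 0, 0]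
-- ===== Notes on version B (the rewrite author's own statement) =====
-- stated objective: simpler
-- what changed: Replaces the dict, sorted key list and max-over-filtered-comprehension floor scan with a single target computation and a descending if-ladder of threshold comparisons returning literal configurations.
import Mathlib
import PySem

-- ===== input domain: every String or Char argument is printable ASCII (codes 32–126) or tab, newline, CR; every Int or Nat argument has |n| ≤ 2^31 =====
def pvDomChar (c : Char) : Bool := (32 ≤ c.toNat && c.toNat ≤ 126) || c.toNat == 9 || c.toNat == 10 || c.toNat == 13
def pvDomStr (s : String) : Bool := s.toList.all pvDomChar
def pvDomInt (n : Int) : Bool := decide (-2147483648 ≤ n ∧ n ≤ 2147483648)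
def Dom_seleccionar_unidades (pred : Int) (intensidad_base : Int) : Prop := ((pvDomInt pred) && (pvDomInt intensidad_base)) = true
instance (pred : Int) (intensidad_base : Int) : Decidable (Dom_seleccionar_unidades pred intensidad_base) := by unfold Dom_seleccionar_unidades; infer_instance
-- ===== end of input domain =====

-- B replaces A's dict + sorted keys + max-over-filter floor scan by a descending
-- if-ladder of threshold comparisons (objective: simpler).

-- ===== PORT A =====
-- the dict literal tabla_intensidad
def pvTabla : PySem.Dict Int (List Int) :=
  PySem.Dict.ofList
    [(0, [0, 0, 0, 0, 0]), (15, [1, 0, 0, 0, 0]), (25, [1, 0, 1, 0, 0]),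
     (50, [1, 0, 1, 1, 0]), (75, [1, 0, 1, 1, 1]), (100, [1, 1, 1, 1, 1])]

def seleccionar_unidades (pred : Int) (intensidad_base : Int) : List Int :=
  let tabla_intensidad := pvTabla
  let diferencia := |pred - intensidad_base|
  let intensidades := PySem.List.sorted tabla_intensidad.keys (fun x => x) false
  let intensidad_cercana :=
    if diferencia < 10 then
      (PySem.List.max? (intensidades.filter (fun i => i ≤ intensidad_base)) (fun x => x)).getD 0
    else
      (PySem.List.max? (intensidades.filter (fun i => i ≤ pred)) (fun x => x)).getD 0
  -- tabla_intensidad[intensidad_cercana]: the key is always present (0 or a filtered key),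
  -- so the KeyError branch (get? = none) never fires; [] is only a type-correct default.
  (tabla_intensidad.get? intensidad_cercana).getD []

-- ===== PORT B =====
def seleccionar_unidades_alt (pred : Int) (intensidad_base : Int) : List Int :=
  let target := if |pred - intensidad_base| < 10 then intensidad_base else pred
  if target ≥ 100 then [1, 1, 1, 1, 1]
  else if target ≥ 75 then [1, 0, 1, 1, 1]
  else if target ≥ 50 then [1, 0, 1, 1, 0]
  else if target ≥ 25 then [1, 0, 1, 0, 0]
  else if target ≥ 15 then [1, 0, 0, 0, 0]
  else [0, 0, 0, 0, 0]

-- ===== PRECONDITION & SPEC =====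
def Spec_seleccionar_unidades (pred : Int) (intensidad_base : Int) (out : List Int) : Prop := out = seleccionar_unidades_alt pred intensidad_base
instance (pred : Int) (intensidad_base : Int) (out : List Int) : Decidable (Spec_seleccionar_unidades pred intensidad_base out) := by unfold Spec_seleccionar_unidades; infer_instance

-- ===== CLAIM (what is proved, stated in full; the proofs are below) =====
def Claim_equal_seleccionar_unidades : Prop := ∀ (pred : Int) (intensidad_base : Int), Dom_seleccionar_unidades pred intensidad_base → Spec_seleccionar_unidades pred intensidad_base (seleccionar_unidades pred intensidad_base)

-- ===== LEMMAS AND PROOFS =====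

-- A's floor lookup for an arbitrary threshold t equals B's if-ladder.
theorem pv_core (t : Int) :
    (pvTabla.get?
      ((PySem.List.max?
          ((PySem.List.sorted pvTabla.keys (fun x => x) false).filter (fun i => i ≤ t))
          (fun x => x)).getD 0)).getD []
    = (if t ≥ 100 then [1, 1, 1, 1, 1]
       else if t ≥ 75 then [1, 0, 1, 1, 1]
       else if t ≥ 50 then [1, 0, 1, 1, 0]
       else if t ≥ 25 then [1, 0, 1, 0, 0]
       else if t ≥ 15 then [1, 0, 0, 0, 0]
       else [0, 0, 0, 0, 0]) := by
  have hs : PySem.List.sorted pvTabla.keys (fun x => x) false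
      = [0, 15, 25, 50, 75, 100] := by decide
  rw [hs]
  split_ifs with h1 h2 h3 h4 h5
  · simp [List.filter, show (0:Int) ≤ t by omega, show (15:Int) ≤ t by omega,
      show (25:Int) ≤ t by omega, show (50:Int) ≤ t by omega,
      show (75:Int) ≤ t by omega, h1]
    decide
  · simp [List.filter, show (0:Int) ≤ t by omega, show (15:Int) ≤ t by omega,
      show (25:Int) ≤ t by omega, show (50:Int) ≤ t by omega, h2,
      show ¬ (100:Int) ≤ t by omega]
    decide
  · simp [List.filter, show (0:Int) ≤ t by omega, show (15:Int) ≤ t by omega,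
      show (25:Int) ≤ t by omega, h3, show ¬ (75:Int) ≤ t by omega,
      show ¬ (100:Int) ≤ t by omega]
    decide
  · simp [List.filter, show (0:Int) ≤ t by omega, show (15:Int) ≤ t by omega, h4,
      show ¬ (50:Int) ≤ t by omega, show ¬ (75:Int) ≤ t by omega,
      show ¬ (100:Int) ≤ t by omega]
    decide
  · simp [List.filter, show (0:Int) ≤ t by omega, h5, show ¬ (25:Int) ≤ t by omega,
      show ¬ (50:Int) ≤ t by omega, show ¬ (75:Int) ≤ t by omega,
      show ¬ (100:Int) ≤ t by omega]
    decide
  · by_cases h0 : (0:Int) ≤ t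
    · simp [List.filter, h0, show ¬ (15:Int) ≤ t by omega, show ¬ (25:Int) ≤ t by omega,
        show ¬ (50:Int) ≤ t by omega, show ¬ (75:Int) ≤ t by omega,
        show ¬ (100:Int) ≤ t by omega]
      decide
    · simp [List.filter, h0, show ¬ (15:Int) ≤ t by omega, show ¬ (25:Int) ≤ t by omega,
        show ¬ (50:Int) ≤ t by omega, show ¬ (75:Int) ≤ t by omega,
        show ¬ (100:Int) ≤ t by omega]
      decide

theorem seleccionar_unidades_eq_alt (pred intensidad_base : Int) :
    seleccionar_unidades pred intensidad_base = seleccionar_unidades_alt pred intensidad_base := by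
  unfold seleccionar_unidades seleccionar_unidades_alt
  by_cases h : |pred - intensidad_base| < 10 <;>
    simp only [h, if_pos] <;> simp [pv_core]

-- ===== VERDICT (by name: the statement is the Claim_ definition above) =====
theorem seleccionar_unidades_spec : Claim_equal_seleccionar_unidades := by
  intro pred intensidad_base _
  exact seleccionar_unidades_eq_alt pred intensidad_base
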